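-- pv_equiv track=rewrite | github.com/Ingkarat/PoTo | infer.py | reconstructClassVarORUnion
-- ===== SOURCE A (Python) =====
-- def mod_string_change_outter_comma(s):
--    bracket = 0
--    ss = ""
--    for a in s:
--       if a == "[":
--          bracket += 1
--       elif a == "]":
--          bracket -= 1
--       if a == "," and bracket == 0:
--          ss += ",,,"
--       else:
--          ss += a
--    return ss
--
-- def stringlisthelper(s):
--    s = mod_string_change_outter_comma(s)
--    if ",,, " in s:
--       s = s.replace(",,, ", ",,,")
--    ss = s.split(",,,")
--    return ss
--
-- def reconstructClassVarORUnion(ll):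
--    x = []
--    is_change = False
--    for l in ll:
--       if l.startswith("ClassVar["):
--          a = l[9:-1]
--          x.append(a)
--          is_change = True
--       elif l.startswith("Union["):
--          a = l[6:-1]
--          aa = stringlisthelper(a)
--          for b in aa:
--             x.append(b)
--          is_change = True
--       elif l.startswith("typing."):
--          a = l[7:]
--          x.append(a)
--          is_change = True
--       elif l.startswith("Type["):
--          a = l[5:-1]
--          x.append(a)
--          is_change = True
--       else:
--          x.append(l)
--
--    if is_change: return reconstructClassVarORUnion(x)
--
--    # Type[Optional...  OR Optional[Type...  either can come first so here is an unsound (and bad) fix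
--    #return reconstructOptional(x)
--
--    return x
-- ===== SOURCE B (Python) =====
-- # B: reduce each element independently by direct recursion to normal form (no whole-list passes, no change flag); same helpers.
-- def mod_string_change_outter_comma(s):
--    bracket = 0
--    ss = ""
--    for a in s:
--       if a == "[":
--          bracket += 1
--       elif a == "]":
--          bracket -= 1
--       if a == "," and bracket == 0:
--          ss += ",,,"
--       else:
--          ss += a
--    return ss
--
-- def stringlisthelper(s):
--    s = mod_string_change_outter_comma(s)
--    if ",,, " in s:
--       s = s.replace(",,, ", ",,,")
--    ss = s.split(",,,")
--    return ss
--
-- def _reduce(s):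
--    if s.startswith("ClassVar["):
--       return _reduce(s[9:-1])
--    if s.startswith("Union["):
--       out = []
--       for p in stringlisthelper(s[6:-1]):
--          out += _reduce(p)
--       return out
--    if s.startswith("typing."):
--       return _reduce(s[7:])
--    if s.startswith("Type["):
--       return _reduce(s[5:-1])
--    return [s]
--
-- def reconstructClassVarORUnion(ll):
--    return [t for l in ll for t in _reduce(l)]
-- ===== Notes on version B (the rewrite author's own statement) =====
-- stated objective: simpler
-- what changed: A repeatedly rewrites the whole list in full passes, tracking a change flag and recursing on the entire list until a pass changes nothing; B drops the flag-and-recurse fixpoint and instead reduces each element independently to normal form with a small direct recursion (Union pieces reduced in order), concatenating the per-element results in one sweep.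
import Mathlib
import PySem

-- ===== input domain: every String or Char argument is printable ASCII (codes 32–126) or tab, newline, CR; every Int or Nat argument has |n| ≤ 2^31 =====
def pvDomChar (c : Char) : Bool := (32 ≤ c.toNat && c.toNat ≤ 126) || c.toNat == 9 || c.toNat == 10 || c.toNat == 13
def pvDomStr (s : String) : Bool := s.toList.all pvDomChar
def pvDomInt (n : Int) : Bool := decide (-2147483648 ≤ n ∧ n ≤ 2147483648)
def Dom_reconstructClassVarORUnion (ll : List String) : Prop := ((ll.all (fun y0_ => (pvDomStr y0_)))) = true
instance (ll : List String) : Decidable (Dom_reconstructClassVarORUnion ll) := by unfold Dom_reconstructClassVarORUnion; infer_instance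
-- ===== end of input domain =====

-- B replaces A's whole-list rewrite-and-recurse fixpoint by a per-element recursive reducer; objective: simpler decomposition, not speed.

-- ===== PORT A =====
-- termination measure machinery (cited by port A's decreasing_by): μ(s) = 4^(count '[' s) * len s

def pvMu (s : String) : Nat := 4 ^ (s.toList.count '[') * s.toList.length

def pvMuSum (ll : List String) : Nat := (ll.map pvMu).sum

-- Python l[k:-1] on the char list
lemma pvSlice_eq (xs : List Char) (k : Nat) :
    PySem.List.slice xs (some (k : Int)) (some (-1)) = (xs.drop k).dropLast := by
  by_cases hnil : xs = []
  · subst hnil; simp [PySem.List.slice, PySem.List.clampIdx]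
  · have hn : 0 < xs.length := List.length_pos_iff.mpr hnil
    simp only [PySem.List.slice, PySem.List.clampIdx]
    rw [if_neg (by omega : ¬((k : Int) < 0)), if_pos (by norm_num : ((-1:Int)) < 0),
        if_neg (by omega : ¬((xs.length : Int) + -1 < 0))]
    have c4 : ((k : Int)).toNat = k := by omega
    have c5 : ((xs.length : Int) + -1).toNat = xs.length - 1 := by omega
    rw [c4, c5, List.dropLast_eq_take]
    have c6 : (List.drop k xs).length = xs.length - k := by simp
    rw [c6]
    rcases Nat.lt_or_ge k xs.length with hk | hk
    · rw [Nat.min_eq_left (Nat.le_of_lt hk)]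
      congr 1
      omega
    · rw [Nat.min_eq_right hk, List.drop_length, List.drop_eq_nil_of_le hk]
      simp

lemma pvMu_lt_of (a l : List Char) (hc : a.count '[' ≤ l.count '[')
    (hl : a.length < l.length) :
    4 ^ (a.count '[') * a.length < 4 ^ (l.count '[') * l.length := by
  calc 4 ^ (a.count '[') * a.length ≤ 4 ^ (l.count '[') * a.length := by
        exact Nat.mul_le_mul_right _ (Nat.pow_le_pow_right (by norm_num) hc)
    _ < 4 ^ (l.count '[') * l.length := by
        exact Nat.mul_lt_mul_of_pos_left hl (Nat.pow_pos (by norm_num))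

-- prefix facts
lemma pvPrefix_of_startswith (l p : String) (h : PySem.Str.startswith l p = true) :
    p.toList ++ l.toList.drop p.toList.length = l.toList := by
  rw [PySem.Str.startswith_eq] at h
  obtain ⟨t, ht⟩ := (PySem.Chars.startswith_iff _ _).mp h
  rw [← ht]
  simp

-- μ strictly drops for the three single-piece rules (strip a nonempty prefix, maybe a trailing char)
lemma pvMu_strip_lt (l p : String) (h : PySem.Str.startswith l p = true) (hp : 0 < p.toList.length) :
    pvMu (PySem.Str.slice l (some (p.toList.length : Int)) (some (-1))) < pvMu l := by
  have hpre := pvPrefix_of_startswith l p h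
  unfold pvMu
  rw [PySem.Str.toList_slice, PySem.Chars.slice_eq_listSlice, pvSlice_eq]
  apply pvMu_lt_of
  · exact List.Sublist.count_le _ (List.Sublist.trans (List.dropLast_sublist _) (List.drop_sublist _ _))
  · have hlen : p.toList.length + (l.toList.drop p.toList.length).length = l.toList.length := by
      have := congrArg List.length hpre; simpa using this
    have h1 : (l.toList.drop p.toList.length).dropLast.length ≤ (l.toList.drop p.toList.length).length := by
      simp [List.length_dropLast]
    omega

lemma pvMu_dropPrefix_lt (l p : String) (h : PySem.Str.startswith l p = true) (hp : 0 < p.toList.length) :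
    pvMu (PySem.Str.slice l (some (p.toList.length : Int)) none) < pvMu l := by
  have hpre := pvPrefix_of_startswith l p h
  unfold pvMu
  rw [PySem.Str.toList_slice, PySem.Chars.slice_eq_listSlice, PySem.List.slice_from]
  have h2 : ((p.toList.length : Int)).toNat = p.toList.length := by simp
  rw [h2]
  apply pvMu_lt_of
  · exact List.Sublist.count_le _ (List.drop_sublist _ _)
  · have hlen : p.toList.length + (l.toList.drop p.toList.length).length = l.toList.length := by
      have := congrArg List.length hpre; simpa using this
    omega
  · exact Int.natCast_nonneg _

-- ==== Union rule: bounds through mod_string / replace / split ====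

def pvModStep (st : Int × List Char) (a : Char) : Int × List Char :=
  let b := if a = '[' then st.1 + 1 else if a = ']' then st.1 - 1 else st.1
  if a = ',' ∧ b = 0 then (b, st.2 ++ [',', ',', ',']) else (b, st.2 ++ [a])

lemma pvModStep_snd (st : Int × List Char) (a : Char) :
    ∃ ch : List Char, (pvModStep st a).2 = st.2 ++ ch ∧ ch.length ≤ 3 ∧
      (∀ c : Char, c ≠ ',' → ch.count c ≤ List.count c [a]) := by
  simp only [pvModStep]
  split_ifs <;>
    first
      | exact ⟨[a], rfl, by simp, fun c hc => le_refl _⟩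
      | (refine ⟨[',', ',', ','], rfl, by simp, fun c hc => ?_⟩
         simp [List.count_cons, Ne.symm hc])

lemma pvModStep_foldl_len : ∀ (cs : List Char) (b : Int) (acc : List Char),
    (cs.foldl pvModStep (b, acc)).2.length ≤ acc.length + 3 * cs.length := by
  intro cs
  induction cs with
  | nil => intro b acc; simp
  | cons a t ih =>
    intro b acc
    simp only [List.foldl_cons]
    obtain ⟨ch, hch, hlen, -⟩ := pvModStep_snd (b, acc) a
    have hst : pvModStep (b, acc) a = ((pvModStep (b, acc) a).1, acc ++ ch) := by
      rw [← hch]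
    rw [hst]
    have h1 := ih (pvModStep (b, acc) a).1 (acc ++ ch)
    simp [List.length_append] at h1 ⊢
    omega

lemma pvModStep_foldl_count (c : Char) (hc : c ≠ ',') : ∀ (cs : List Char) (b : Int) (acc : List Char),
    (cs.foldl pvModStep (b, acc)).2.count c ≤ acc.count c + cs.count c := by
  intro cs
  induction cs with
  | nil => intro b acc; simp
  | cons a t ih =>
    intro b acc
    simp only [List.foldl_cons]
    obtain ⟨ch, hch, -, hcnt⟩ := pvModStep_snd (b, acc) a
    have hst : pvModStep (b, acc) a = ((pvModStep (b, acc) a).1, acc ++ ch) := by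
      rw [← hch]
    rw [hst]
    have h1 := ih (pvModStep (b, acc) a).1 (acc ++ ch)
    have h2 := hcnt c hc
    simp [List.count_append, List.count_cons] at h1 h2 ⊢
    omega

lemma pvReplace_go_len (old new : List Char) (hn : new.length ≤ old.length) :
    ∀ fuel (l acc : List Char), (PySem.Chars.replace.go old new fuel l acc).length ≤ acc.length + l.length := by
  intro fuel
  induction fuel with
  | zero => intro l acc; simp [PySem.Chars.replace.go]
  | succ n ih =>
    intro l acc
    cases l with
    | nil => simp [PySem.Chars.replace.go]
    | cons c t =>
      rw [PySem.Chars.replace.go]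
      split
      · rename_i hp
        obtain ⟨t', ht'⟩ := List.isPrefixOf_iff_prefix.mp hp
        have h1 := ih (List.drop old.length (c :: t)) (new.reverse ++ acc)
        have hlen : old.length ≤ t.length + 1 := by
          have := congrArg List.length ht'; simp at this; omega
        simp [List.length_cons] at h1 ⊢
        omega
      · have h1 := ih t (c :: acc)
        simp [List.length_cons] at h1 ⊢
        omega

lemma pvReplace_go_count (c : Char) (old new : List Char) (hc : new.count c ≤ old.count c) :
    ∀ fuel (l acc : List Char), (PySem.Chars.replace.go old new fuel l acc).count c ≤ acc.count c + l.count c := by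
  intro fuel
  induction fuel with
  | zero => intro l acc; simp [PySem.Chars.replace.go, List.count_append]
  | succ n ih =>
    intro l acc
    cases l with
    | nil => simp [PySem.Chars.replace.go]
    | cons d t =>
      rw [PySem.Chars.replace.go]
      split
      · rename_i hp
        obtain ⟨t', ht'⟩ := List.isPrefixOf_iff_prefix.mp hp
        have h1 := ih (List.drop old.length (d :: t)) (new.reverse ++ acc)
        have hdrop : List.drop old.length (d :: t) = t' := by
          rw [← ht']; simp
        have hcnt : (d :: t).count c = old.count c + t'.count c := by
          rw [← ht']; simp [List.count_append]
        rw [hdrop] at h1 ⊢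
        simp [List.count_append] at h1 ⊢
        omega
      · have h1 := ih t (d :: acc)
        simp [List.count_cons] at h1 ⊢
        rcases eq_or_ne d c with h | h <;> simp [h] at h1 ⊢ <;> omega

def pvSumLen (xs : List (List Char)) : Nat := (xs.map List.length).sum
def pvSumCnt (c : Char) (xs : List (List Char)) : Nat := (xs.map (List.count c)).sum

lemma pvSplit_go_len (sep : List Char) :
    ∀ fuel (l cur : List Char) (acc : List (List Char)),
      pvSumLen (PySem.Chars.splitOn.go sep fuel l cur acc) ≤ pvSumLen acc + cur.length + l.length := by
  intro fuel
  induction fuel with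
  | zero => intro l cur acc; simp [PySem.Chars.splitOn.go, pvSumLen]; try omega
  | succ n ih =>
    intro l cur acc
    cases l with
    | nil => simp [PySem.Chars.splitOn.go, pvSumLen]; try omega
    | cons c t =>
      rw [PySem.Chars.splitOn.go]
      split
      · rename_i hp
        obtain ⟨t', ht'⟩ := List.isPrefixOf_iff_prefix.mp hp
        have h1 := ih (List.drop sep.length (c :: t)) [] (cur.reverse :: acc)
        have hdrop : List.drop sep.length (c :: t) = t' := by rw [← ht']; simp
        have hlen : (c :: t).length = sep.length + t'.length := by
          rw [← ht']; simp
        rw [hdrop] at h1 ⊢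
        simp [pvSumLen, List.length_cons] at h1 hlen ⊢
        omega
      · have h1 := ih t (c :: cur) acc
        simp at h1 ⊢
        omega

lemma pvSplit_go_count (c : Char) (sep : List Char) :
    ∀ fuel (l cur : List Char) (acc : List (List Char)),
      pvSumCnt c (PySem.Chars.splitOn.go sep fuel l cur acc) ≤ pvSumCnt c acc + cur.count c + l.count c := by
  intro fuel
  induction fuel with
  | zero => intro l cur acc; simp [PySem.Chars.splitOn.go, pvSumCnt, List.count_append]; try omega
  | succ n ih =>
    intro l cur acc
    cases l with
    | nil => simp [PySem.Chars.splitOn.go, pvSumCnt]; try omega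
    | cons d t =>
      rw [PySem.Chars.splitOn.go]
      split
      · rename_i hp
        obtain ⟨t', ht'⟩ := List.isPrefixOf_iff_prefix.mp hp
        have h1 := ih (List.drop sep.length (d :: t)) [] (cur.reverse :: acc)
        have hdrop : List.drop sep.length (d :: t) = t' := by rw [← ht']; simp
        have hcnt : (d :: t).count c = sep.count c + t'.count c := by
          rw [← ht']; simp [List.count_append]
        rw [hdrop] at h1 ⊢
        simp [pvSumCnt] at h1 ⊢
        omega
      · have h1 := ih t (d :: cur) acc
        simp [List.count_cons] at h1 ⊢
        rcases eq_or_ne d c with h | h <;> simp [h] at h1 ⊢ <;> omega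

-- ===== the ported helpers (shared by A and B, as in the Python) =====

def mod_string_change_outter_comma (s : String) : String :=
  String.ofList (s.toList.foldl pvModStep ((0 : Int), ([] : List Char))).2

def stringlisthelper (s : String) : List String :=
  let s1 := mod_string_change_outter_comma s
  let s2 := if PySem.Str.isIn ",,, " s1 = true then PySem.Str.replace s1 ",,, " ",,," else s1
  (PySem.Str.split? s2 ",,,").getD []

def pvModL (cs : List Char) : List Char := (cs.foldl pvModStep ((0 : Int), ([] : List Char))).2

def pvS2Chars (t : List Char) : List Char :=
  if PySem.Chars.isIn [',', ',', ',', ' '] t = true then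
    PySem.Chars.replace t [',', ',', ',', ' '] [',', ',', ','] else t

lemma pvS2Chars_len (t : List Char) : (pvS2Chars t).length ≤ t.length := by
  unfold pvS2Chars
  split
  · show (PySem.Chars.replace t _ _).length ≤ t.length
    simp only [PySem.Chars.replace]
    rw [if_neg (by decide)]
    have := pvReplace_go_len [',', ',', ',', ' '] [',', ',', ','] (by decide) t.length t []
    simpa using this
  · exact le_refl _

lemma pvS2Chars_count (t : List Char) : (pvS2Chars t).count '[' ≤ t.count '[' := by
  unfold pvS2Chars
  split
  · show (PySem.Chars.replace t _ _).count '[' ≤ t.count '['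
    simp only [PySem.Chars.replace]
    rw [if_neg (by decide)]
    have := pvReplace_go_count '[' [',', ',', ',', ' '] [',', ',', ','] (by decide) t.length t []
    simpa using this
  · exact le_refl _

lemma pvSplit3_eq (X : String) :
    (PySem.Str.split? X ",,,").getD [] = (PySem.Chars.splitOn X.toList [',', ',', ',']).map String.ofList := by
  have h3 : (",,," : String).toList = [',', ',', ','] := rfl
  simp [PySem.Str.split?, PySem.Chars.split?, h3]

lemma pvS2_toList (s : String) :
    (if PySem.Str.isIn ",,, " (mod_string_change_outter_comma s) = true
     then PySem.Str.replace (mod_string_change_outter_comma s) ",,, " ",,,"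
     else mod_string_change_outter_comma s).toList = pvS2Chars (pvModL s.toList) := by
  have h4 : (",,, " : String).toList = [',', ',', ',', ' '] := rfl
  have h3 : (",,," : String).toList = [',', ',', ','] := rfl
  have hmod : (mod_string_change_outter_comma s).toList = pvModL s.toList := by
    unfold mod_string_change_outter_comma pvModL
    simp
  unfold pvS2Chars
  rw [apply_ite String.toList, PySem.Str.isIn_eq, h4, hmod, PySem.Str.toList_replace, h4, h3, hmod]

lemma stringlisthelper_eq (s : String) :
    stringlisthelper s = (PySem.Chars.splitOn (pvS2Chars (pvModL s.toList)) [',', ',', ',']).map String.ofList := by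
  simp only [stringlisthelper]
  rw [pvSplit3_eq, pvS2_toList]

lemma pvMusumList_le (ps : List (List Char)) (k : Nat) (h : ∀ p ∈ ps, p.count '[' ≤ k) :
    (ps.map fun p => 4 ^ p.count '[' * p.length).sum ≤ 4 ^ k * (ps.map List.length).sum := by
  induction ps with
  | nil => simp
  | cons p t ih =>
    simp only [List.map_cons, List.sum_cons]
    have h1 : 4 ^ p.count '[' * p.length ≤ 4 ^ k * p.length :=
      Nat.mul_le_mul_right _ (Nat.pow_le_pow_right (by norm_num) (h p (by simp)))
    have h2 := ih (fun q hq => h q (by simp [hq]))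
    rw [Nat.mul_add]
    omega

lemma pvMu_union_lt (l : String) (h : PySem.Str.startswith l "Union[" = true) :
    pvMuSum (stringlisthelper (PySem.Str.slice l (some 6) (some (-1)))) < pvMu l := by
  have hpre := pvPrefix_of_startswith l "Union[" h
  rw [show ("Union[" : String).toList.length = 6 from rfl] at hpre
  have ha : (PySem.Str.slice l (some 6) (some (-1))).toList = (l.toList.drop 6).dropLast := by
    rw [PySem.Str.toList_slice, PySem.Chars.slice_eq_listSlice]
    exact_mod_cast pvSlice_eq l.toList 6
  rw [stringlisthelper_eq, ha]
  set T := l.toList with hT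
  set a := (T.drop 6).dropLast with hA
  set m := pvModL a with hm
  set s2 := pvS2Chars m with hs2
  set ps := PySem.Chars.splitOn s2 [',', ',', ','] with hps
  -- length/count chain
  have hm_len : m.length ≤ 3 * a.length := by
    have := pvModStep_foldl_len a 0 []
    simpa [pvModL] using this
  have hm_cnt : m.count '[' ≤ a.count '[' := by
    have := pvModStep_foldl_count '[' (by decide) a 0 []
    simpa [pvModL] using this
  have hs2_len : s2.length ≤ m.length := pvS2Chars_len m
  have hs2_cnt : s2.count '[' ≤ m.count '[' := pvS2Chars_count m
  have hsumlen : pvSumLen ps ≤ s2.length := by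
    have := pvSplit_go_len [',', ',', ','] (s2.length + 1) s2 [] []
    simpa [hps, PySem.Chars.splitOn, pvSumLen] using this
  have hsumcnt : pvSumCnt '[' ps ≤ s2.count '[' := by
    have := pvSplit_go_count '[' [',', ',', ','] (s2.length + 1) s2 [] []
    simpa [hps, PySem.Chars.splitOn, pvSumCnt] using this
  -- prefix accounting on T
  have hTlen : T.length = 6 + (T.drop 6).length := by
    have h1 := congrArg List.length hpre
    rw [List.length_append, show ("Union[" : String).toList.length = 6 from rfl] at h1
    omega
  have hTcnt : T.count '[' = 1 + (T.drop 6).count '[' := by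
    have := congrArg (List.count '[') hpre
    rw [List.count_append] at this
    have h1 : List.count '[' ("Union[".toList) = 1 := by decide
    omega
  have ha_len : a.length ≤ (T.drop 6).length := by
    rw [hA, List.length_dropLast]; exact Nat.sub_le _ _
  have ha_cnt : a.count '[' ≤ (T.drop 6).count '[' := by
    rw [hA]; exact List.Sublist.count_le _ (List.dropLast_sublist _)
  -- per-piece bracket bound
  have hpp : ∀ p ∈ ps, p.count '[' ≤ T.count '[' - 1 := by
    intro p hp
    have h1 : p.count '[' ≤ pvSumCnt '[' ps := by
      apply List.single_le_sum (fun x _ => Nat.zero_le x)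
      exact List.mem_map_of_mem hp
    omega
  -- assemble
  have hmain : pvMuSum (ps.map String.ofList) = (ps.map fun p => 4 ^ p.count '[' * p.length).sum := by
    simp only [pvMuSum, List.map_map]
    refine congrArg List.sum (List.map_congr_left fun p _ => ?_)
    simp [pvMu, Function.comp, String.toList_ofList]
  rw [hmain]
  have hbound := pvMusumList_le ps (T.count '[' - 1) hpp
  have hTpos : 0 < T.length := by omega
  have hcnt1 : 1 ≤ T.count '[' := by omega
  have hfinal : 4 ^ (T.count '[' - 1) * (ps.map List.length).sum < 4 ^ (T.count '[') * T.length := by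
    have hx : (ps.map List.length).sum ≤ 3 * T.length := by
      have : pvSumLen ps = (ps.map List.length).sum := rfl
      omega
    calc 4 ^ (T.count '[' - 1) * (ps.map List.length).sum
        ≤ 4 ^ (T.count '[' - 1) * (3 * T.length) := Nat.mul_le_mul_left _ hx
      _ < 4 ^ (T.count '[' - 1) * (4 * T.length) := by
          exact Nat.mul_lt_mul_of_pos_left (by omega) (Nat.pow_pos (by norm_num))
      _ = 4 ^ (T.count '[') * T.length := by
          rw [← Nat.mul_assoc, ← Nat.pow_succ]
          congr 2
          omega
  unfold pvMu
  rw [← hT]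
  omega

-- per-element step of A's pass, extracted so the termination lemma can speak about it
def pvStepA (st : List String × Bool) (l : String) : List String × Bool :=
  if PySem.Str.startswith l "ClassVar[" then
    (st.1 ++ [PySem.Str.slice l (some 9) (some (-1))], true)
  else if PySem.Str.startswith l "Union[" then
    (st.1 ++ stringlisthelper (PySem.Str.slice l (some 6) (some (-1))), true)
  else if PySem.Str.startswith l "typing." then
    (st.1 ++ [PySem.Str.slice l (some 7) none], true)
  else if PySem.Str.startswith l "Type[" then
    (st.1 ++ [PySem.Str.slice l (some 5) (some (-1))], true)
  else (st.1 ++ [l], st.2)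

lemma pvMu_classvar_lt (l : String) (h : PySem.Str.startswith l "ClassVar[" = true) :
    pvMu (PySem.Str.slice l (some 9) (some (-1))) < pvMu l := by
  have := pvMu_strip_lt l "ClassVar[" h (by decide)
  simpa using this

lemma pvMu_typing_lt (l : String) (h : PySem.Str.startswith l "typing." = true) :
    pvMu (PySem.Str.slice l (some 7) none) < pvMu l := by
  have := pvMu_dropPrefix_lt l "typing." h (by decide)
  simpa using this

lemma pvMu_type_lt (l : String) (h : PySem.Str.startswith l "Type[" = true) :
    pvMu (PySem.Str.slice l (some 5) (some (-1))) < pvMu l := by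
  have := pvMu_strip_lt l "Type[" h (by decide)
  simpa using this

lemma pvStepA_mu (st : List String × Bool) (l : String) :
    pvMuSum (pvStepA st l).1 ≤ pvMuSum st.1 + pvMu l ∧
      ((pvStepA st l).2 = true → st.2 = true ∨ pvMuSum (pvStepA st l).1 < pvMuSum st.1 + pvMu l) := by
  unfold pvStepA
  split_ifs with h1 h2 h3 h4
  · have := pvMu_classvar_lt l h1
    constructor
    · simp [pvMuSum]; omega
    · intro _; right; simp [pvMuSum]; omega
  · have := pvMu_union_lt l h2
    constructor
    · simp [pvMuSum, List.sum_append] at this ⊢; omega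
    · intro _; right; simp [pvMuSum, List.sum_append] at this ⊢; omega
  · have := pvMu_typing_lt l h3
    constructor
    · simp [pvMuSum]; omega
    · intro _; right; simp [pvMuSum]; omega
  · have := pvMu_type_lt l h4
    constructor
    · simp [pvMuSum]; omega
    · intro _; right; simp [pvMuSum]; omega
  · constructor
    · simp [pvMuSum]
    · intro hflag; left; simpa using hflag

lemma pvStepA_foldl_mu : ∀ (ll : List String) (st : List String × Bool),
    pvMuSum (ll.foldl pvStepA st).1 ≤ pvMuSum st.1 + pvMuSum ll ∧
      ((ll.foldl pvStepA st).2 = true → st.2 = true ∨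
        pvMuSum (ll.foldl pvStepA st).1 < pvMuSum st.1 + pvMuSum ll) := by
  intro ll
  induction ll with
  | nil => intro st; constructor
           · simp [pvMuSum]
           · intro h; left; simpa using h
  | cons l t ih =>
    intro st
    simp only [List.foldl_cons]
    obtain ⟨hs1, hs2⟩ := pvStepA_mu st l
    obtain ⟨ht1, ht2⟩ := ih (pvStepA st l)
    have hsum : pvMuSum (l :: t) = pvMu l + pvMuSum t := by simp [pvMuSum]
    constructor
    · omega
    · intro hc
      rcases ht2 hc with h | h
      · rcases hs2 h with h' | h'
        · left; exact h'
        · right; omega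
      · right; omega

def reconstructClassVarORUnion (ll : List String) : List String :=
  let st := ll.foldl pvStepA ([], false)
  if h : st.2 = true then reconstructClassVarORUnion st.1 else st.1
termination_by pvMuSum ll
decreasing_by
  have hh : (List.foldl (fun (s : List String × Bool) (x : {x // x ∈ ll}) => pvStepA s x.1)
      ([], false) ll.attach).2 = true := h
  rw [List.foldl_attach] at hh
  rw [List.foldl_attach]
  obtain ⟨-, h2⟩ := pvStepA_foldl_mu ll ([], false)
  rcases h2 hh with h' | h'
  · simp at h'
  · simpa [pvMuSum] using h'

-- ===== PORT B =====
-- Source B's _reduce: direct recursion; the fuel argument only makes the recursion total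
-- (each recursive call strictly shrinks the measure 4^(count '[')·len, which is < the fuel supplied below).

def pvReduceF : Nat → String → List String
  | 0, s => [s]
  | Nat.succ n, s =>
    if PySem.Str.startswith s "ClassVar[" then
      pvReduceF n (PySem.Str.slice s (some 9) (some (-1)))
    else if PySem.Str.startswith s "Union[" then
      (stringlisthelper (PySem.Str.slice s (some 6) (some (-1)))).flatMap (pvReduceF n)
    else if PySem.Str.startswith s "typing." then
      pvReduceF n (PySem.Str.slice s (some 7) none)
    else if PySem.Str.startswith s "Type[" then
      pvReduceF n (PySem.Str.slice s (some 5) (some (-1)))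
    else [s]

def reconstructClassVarORUnion_alt (ll : List String) : List String :=
  ll.flatMap (fun l => pvReduceF (4 ^ l.toList.length * (l.toList.length + 1)) l)

-- ===== PRECONDITION & SPEC =====
def Spec_reconstructClassVarORUnion (ll : List String) (out : List String) : Prop := out = reconstructClassVarORUnion_alt ll
instance (ll : List String) (out : List String) : Decidable (Spec_reconstructClassVarORUnion ll out) := by unfold Spec_reconstructClassVarORUnion; infer_instance

-- ===== CLAIM (what is proved, stated in full; the proofs are below) =====
def Claim_equal_reconstructClassVarORUnion : Prop := ∀ (ll : List String), Dom_reconstructClassVarORUnion ll → Spec_reconstructClassVarORUnion ll (reconstructClassVarORUnion ll)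

-- ===== LEMMAS AND PROOFS =====

def pvMatched (l : String) : Bool :=
  PySem.Str.startswith l "ClassVar[" || PySem.Str.startswith l "Union[" ||
  PySem.Str.startswith l "typing." || PySem.Str.startswith l "Type["

def pvExpand (l : String) : List String :=
  if PySem.Str.startswith l "ClassVar[" then [PySem.Str.slice l (some 9) (some (-1))]
  else if PySem.Str.startswith l "Union[" then stringlisthelper (PySem.Str.slice l (some 6) (some (-1)))
  else if PySem.Str.startswith l "typing." then [PySem.Str.slice l (some 7) none]
  else if PySem.Str.startswith l "Type[" then [PySem.Str.slice l (some 5) (some (-1))]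
  else [l]

def pvRed (s : String) : List String :=
  if PySem.Str.startswith s "ClassVar[" then pvRed (PySem.Str.slice s (some 9) (some (-1)))
  else if PySem.Str.startswith s "Union[" then
    (stringlisthelper (PySem.Str.slice s (some 6) (some (-1)))).attach.flatMap (fun x => pvRed x.1)
  else if PySem.Str.startswith s "typing." then pvRed (PySem.Str.slice s (some 7) none)
  else if PySem.Str.startswith s "Type[" then pvRed (PySem.Str.slice s (some 5) (some (-1)))
  else [s]
termination_by pvMu s
decreasing_by
  · exact pvMu_classvar_lt s (by assumption)
  · rename_i hu
    have hx : pvMu x.1 ≤ pvMuSum (stringlisthelper (PySem.Str.slice s (some 6) (some (-1)))) := by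
      apply List.single_le_sum (fun y _ => Nat.zero_le y)
      exact List.mem_map_of_mem x.2
    exact lt_of_le_of_lt hx (pvMu_union_lt s hu)
  · exact pvMu_typing_lt s (by assumption)
  · exact pvMu_type_lt s (by assumption)

lemma pvExpand_red (l : String) : (pvExpand l).flatMap pvRed = pvRed l := by
  unfold pvExpand
  split_ifs with h1 h2 h3 h4
  · rw [pvRed, if_pos h1]; simp
  · rw [pvRed, if_neg h1, if_pos h2]; simp
  · rw [pvRed, if_neg h1, if_neg h2, if_pos h3]; simp
  · rw [pvRed, if_neg h1, if_neg h2, if_neg h3, if_pos h4]; simp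
  · simp only [List.flatMap_cons, List.flatMap_nil, List.append_nil]

lemma pvRed_unmatched (l : String) (h : pvMatched l = false) : pvRed l = [l] := by
  simp only [pvMatched, Bool.or_eq_false_iff] at h
  obtain ⟨⟨⟨hc, hu⟩, ht⟩, hT⟩ := h
  rw [pvRed, if_neg (by rw [hc]; exact Bool.false_ne_true), if_neg (by rw [hu]; exact Bool.false_ne_true), if_neg (by rw [ht]; exact Bool.false_ne_true),
      if_neg (by rw [hT]; exact Bool.false_ne_true)]

lemma pvExpand_unmatched (l : String) (h : pvMatched l = false) : pvExpand l = [l] := by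
  simp only [pvMatched, Bool.or_eq_false_iff] at h
  obtain ⟨⟨⟨hc, hu⟩, ht⟩, hT⟩ := h
  unfold pvExpand
  rw [if_neg (by rw [hc]; exact Bool.false_ne_true), if_neg (by rw [hu]; exact Bool.false_ne_true), if_neg (by rw [ht]; exact Bool.false_ne_true),
      if_neg (by rw [hT]; exact Bool.false_ne_true)]

lemma pvStepA_eq (st : List String × Bool) (l : String) :
    pvStepA st l = (st.1 ++ pvExpand l, st.2 || pvMatched l) := by
  unfold pvStepA pvExpand pvMatched
  split_ifs with h1 h2 h3 h4
  · rw [h1]; simp only [Bool.true_or, Bool.or_true]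
  · rw [Bool.not_eq_true] at h1
    rw [h1, h2]; simp only [Bool.true_or, Bool.or_true]
  · rw [Bool.not_eq_true] at h1 h2
    rw [h1, h2, h3]; simp only [Bool.false_or, Bool.true_or, Bool.or_true]
  · rw [Bool.not_eq_true] at h1 h2 h3
    rw [h1, h2, h3, h4]; simp only [Bool.or_true]
  · rw [Bool.not_eq_true] at h1 h2 h3 h4
    rw [h1, h2, h3, h4]; simp only [Bool.or_false]

lemma pvFoldlA : ∀ (ll : List String) (acc : List String) (flag : Bool),
    ll.foldl pvStepA (acc, flag) = (acc ++ ll.flatMap pvExpand, flag || ll.any pvMatched) := by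
  intro ll
  induction ll with
  | nil => intro acc flag; simp
  | cons l t ih =>
    intro acc flag
    rw [List.foldl_cons, pvStepA_eq, ih]
    simp [List.flatMap_cons, Bool.or_assoc]

-- fuel sufficiency: with any fuel strictly above the measure, pvReduceF computes pvRed
lemma pvReduceF_eq_red : ∀ (n : Nat) (s : String), pvMu s < n → pvReduceF n s = pvRed s := by
  intro n
  induction n with
  | zero => intro s h; omega
  | succ m ih =>
    intro s h
    rw [pvRed]
    simp only [pvReduceF]
    split_ifs with h1 h2 h3 h4
    · exact ih _ (by have := pvMu_classvar_lt s h1; omega)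
    · have hpieces : ∀ p ∈ stringlisthelper (PySem.Str.slice s (some 6) (some (-1))),
          pvReduceF m p = pvRed p := by
        intro p hp
        apply ih
        have hle : pvMu p ≤ pvMuSum (stringlisthelper (PySem.Str.slice s (some 6) (some (-1)))) := by
          apply List.single_le_sum (fun y _ => Nat.zero_le y)
          exact List.mem_map_of_mem hp
        have := pvMu_union_lt s h2
        omega
      calc (stringlisthelper (PySem.Str.slice s (some 6) (some (-1)))).flatMap (pvReduceF m)
          = (stringlisthelper (PySem.Str.slice s (some 6) (some (-1)))).flatMap pvRed :=
            List.flatMap_congr hpieces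
        _ = (stringlisthelper (PySem.Str.slice s (some 6) (some (-1)))).attach.flatMap
              (fun x => pvRed x.1) := by simp
    · exact ih _ (by have := pvMu_typing_lt s h3; omega)
    · exact ih _ (by have := pvMu_type_lt s h4; omega)
    · rfl

lemma pvMu_lt_fuel (l : String) : pvMu l < 4 ^ l.toList.length * (l.toList.length + 1) := by
  have hc : l.toList.count '[' ≤ l.toList.length := List.count_le_length
  have h1 : pvMu l ≤ 4 ^ l.toList.length * l.toList.length :=
    Nat.mul_le_mul_right _ (Nat.pow_le_pow_right (by norm_num) hc)
  have h2 : 4 ^ l.toList.length * l.toList.length < 4 ^ l.toList.length * (l.toList.length + 1) :=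
    Nat.mul_lt_mul_of_pos_left (Nat.lt_succ_self _) (Nat.pow_pos (by norm_num))
  omega

lemma alt_eq (ll : List String) : reconstructClassVarORUnion_alt ll = ll.flatMap pvRed := by
  unfold reconstructClassVarORUnion_alt
  exact List.flatMap_congr (fun l _ => pvReduceF_eq_red _ l (pvMu_lt_fuel l))

lemma A_eq_red : ∀ (n : Nat) (ll : List String), pvMuSum ll ≤ n →
    reconstructClassVarORUnion ll = ll.flatMap pvRed := by
  intro n
  induction n using Nat.strong_induction_on with
  | _ n ih =>
    intro ll hn
    rw [reconstructClassVarORUnion]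
    obtain ⟨hle, hlt⟩ := pvStepA_foldl_mu ll ([], false)
    rw [pvFoldlA ll [] false] at hle hlt ⊢
    simp only [List.nil_append, Bool.false_or] at hle hlt ⊢
    by_cases hch : ll.any pvMatched = true
    · rw [dif_pos hch]
      rcases hlt hch with h' | h'
      · simp at h'
      · have hlt2 : pvMuSum (ll.flatMap pvExpand) < pvMuSum ll := by
          simpa [pvMuSum] using h'
        rcases Nat.eq_zero_or_pos n with hn0 | hn0
        · omega
        · rw [ih (n - 1) (by omega) _ (by omega)]
          rw [List.flatMap_assoc]
          exact List.flatMap_congr (fun x _ => pvExpand_red x)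
    · rw [dif_neg hch]
      have hall : ∀ x ∈ ll, pvMatched x = false := by
        intro x hx
        rcases Bool.eq_false_or_eq_true (pvMatched x) with hb | hb
        · exact absurd (List.any_eq_true.mpr ⟨x, hx, hb⟩) hch
        · exact hb
      calc ll.flatMap pvExpand = ll.flatMap (fun x => [x]) :=
            List.flatMap_congr (fun x hx => pvExpand_unmatched x (hall x hx))
        _ = ll := List.flatMap_singleton' ll
        _ = ll.flatMap (fun x => [x]) := (List.flatMap_singleton' ll).symm
        _ = ll.flatMap pvRed := List.flatMap_congr (fun x hx => (pvRed_unmatched x (hall x hx)).symm)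

theorem pv_eq (ll : List String) : reconstructClassVarORUnion ll = reconstructClassVarORUnion_alt ll := by
  rw [alt_eq, A_eq_red (pvMuSum ll) ll (le_refl _)]

-- ===== VERDICT (by name: the statement is the Claim_ definition above) =====
theorem reconstructClassVarORUnion_spec : Claim_equal_reconstructClassVarORUnion := by
  intro ll _
  unfold Spec_reconstructClassVarORUnion
  exact pv_eq ll
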